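-- pv_equiv track=rewrite | github.com/MrBrantCode/unitest_baseline | mut_generate/mist_train_taco/taco_7974/solution.py | maximize_happiness
-- ===== SOURCE A (Python) =====
-- def maximize_happiness(N, P, Q, cafeteria_happiness):
--     # Calculate the initial total happiness if all days are spent in the cafeteria
--     total_cafeteria_happiness = sum(cafeteria_happiness)
--
--     # Initialize the list to store possible happiness values
--     ans = [total_cafeteria_happiness]
--
--     # Calculate the difference in happiness if we switch from cafeteria to self-catering on day i
--     difs = [P * (Q - i) - cafeteria_happiness[i] for i in range(N)]
--
--     # Sort the differences in descending order
--     difs.sort(reverse=True)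
--
--     # Calculate the maximum possible happiness by considering switching some days to self-catering
--     for i in range(N):
--         ans.append(ans[-1] + 2 * i * P + difs[i])
--
--     # Return the maximum happiness value found
--     return max(ans)
-- ===== SOURCE B (Python) =====
-- def maximize_happiness(N, P, Q, cafeteria_happiness):
--     total = sum(cafeteria_happiness)
--     difs = [P * (Q - i) - cafeteria_happiness[i] for i in range(N)]
--     best = total
--     gain = 0
--     k = 0
--     while difs:
--         m = max(difs)
--         difs.remove(m)
--         k += 1
--         gain += m
--         best = max(best, total + gain + P * k * (k - 1))
--     return best
-- ===== Notes on version B (the rewrite author's own statement) =====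
-- stated objective: alternative
-- what changed: B never sorts: it extracts the current maximum difference one at a time from the live list (max + remove, selection style), accumulates the running gain and uses the closed form P*k*(k-1) with a running max, instead of A's sort-descending plus incremental ans-list recurrence and a final max over the materialised list; correct because the k extracted maxima are exactly the k largest differences, i.e. the prefix of A's sorted list.
import Mathlib
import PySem

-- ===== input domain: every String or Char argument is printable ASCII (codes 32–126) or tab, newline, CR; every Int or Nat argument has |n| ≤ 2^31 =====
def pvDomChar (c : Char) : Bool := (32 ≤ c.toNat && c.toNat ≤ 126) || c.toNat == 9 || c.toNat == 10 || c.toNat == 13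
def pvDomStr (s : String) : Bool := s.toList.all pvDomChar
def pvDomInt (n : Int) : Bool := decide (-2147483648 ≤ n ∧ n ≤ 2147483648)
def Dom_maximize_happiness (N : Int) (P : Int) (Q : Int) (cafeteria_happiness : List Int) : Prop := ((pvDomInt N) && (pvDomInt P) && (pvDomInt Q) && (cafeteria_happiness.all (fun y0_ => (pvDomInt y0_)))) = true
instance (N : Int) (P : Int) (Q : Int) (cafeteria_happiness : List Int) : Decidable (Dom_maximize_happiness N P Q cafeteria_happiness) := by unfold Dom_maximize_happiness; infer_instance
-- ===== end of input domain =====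

-- B avoids sorting: it repeatedly extracts the current maximum difference (selection by max+remove)
-- with a running gain and the closed form P*k*(k-1) — an alternative algorithm, not faster.

-- ===== PORT A =====
def maximize_happiness (N : Int) (P : Int) (Q : Int) (cafeteria_happiness : List Int) : Int :=
  let total := cafeteria_happiness.sum
  let ans : List Int := [total]
  let difs := (PySem.List.pyRange 0 N 1).map
      (fun i => P * (Q - i) - PySem.List.pyGetD cafeteria_happiness i 0)
  let difs := PySem.List.sorted difs (fun x => x) true
  let ans := (PySem.List.pyRange 0 N 1).foldl
      (fun ans i => ans ++ [PySem.List.pyGetD ans (-1) 0 + 2 * i * P + PySem.List.pyGetD difs i 0]) ans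
  (PySem.List.max? ans (fun x => x)).getD 0

-- ===== PORT B =====
-- the 'while difs:' loop of Source B: m = max(difs); difs.remove(m); running gain, k, best.
-- fuel = length of difs makes the recursion structural; the loop runs exactly that many times.
def selLoop (P total : Int) : Nat → List Int → Int → Int → Int → Int
  | 0, _, best, _, _ => best
  | fuel + 1, ds, best, gain, k =>
    if ds.isEmpty then best
    else
      let m := (PySem.List.max? ds (fun x => x)).getD 0
      let ds' := (PySem.List.remove? ds m).getD []
      let k' := k + 1
      let gain' := gain + m
      selLoop P total fuel ds' (max best (total + gain' + P * k' * (k' - 1))) gain' k'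

def maximize_happiness_alt (N : Int) (P : Int) (Q : Int) (cafeteria_happiness : List Int) : Int :=
  let total := cafeteria_happiness.sum
  let difs := (PySem.List.pyRange 0 N 1).map
      (fun i => P * (Q - i) - PySem.List.pyGetD cafeteria_happiness i 0)
  selLoop P total difs.length difs total 0 0

-- ===== PRECONDITION & SPEC =====
-- Pre_ excludes exactly the inputs where Python A raises IndexError: N larger than the list length
-- (cafeteria_happiness[i] is read for i in range(N)). B raises there too.
def Pre_maximize_happiness (N : Int) (P : Int) (Q : Int) (cafeteria_happiness : List Int) : Prop :=
  N ≤ (cafeteria_happiness.length : Int)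
instance (N : Int) (P : Int) (Q : Int) (cafeteria_happiness : List Int) : Decidable (Pre_maximize_happiness N P Q cafeteria_happiness) := by unfold Pre_maximize_happiness; infer_instance

def pvWitness_maximize_happiness : Int × Int × Int × List Int := (2, 1, 3, [5, 1])

def Spec_maximize_happiness (N : Int) (P : Int) (Q : Int) (cafeteria_happiness : List Int) (out : Int) : Prop := out = maximize_happiness_alt N P Q cafeteria_happiness
instance (N : Int) (P : Int) (Q : Int) (cafeteria_happiness : List Int) (out : Int) : Decidable (Spec_maximize_happiness N P Q cafeteria_happiness out) := by unfold Spec_maximize_happiness; infer_instance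

-- ===== CLAIM (what is proved, stated in full; the proofs are below) =====
def Claim_equal_maximize_happiness : Prop := ∀ (N : Int) (P : Int) (Q : Int) (cafeteria_happiness : List Int), Dom_maximize_happiness N P Q cafeteria_happiness → Pre_maximize_happiness N P Q cafeteria_happiness → Spec_maximize_happiness N P Q cafeteria_happiness (maximize_happiness N P Q cafeteria_happiness)

-- ===== LEMMAS AND PROOFS =====

-- the successive entries A appends: cand P l last j = [last + 2*j*P + l[0], …] for the remaining
-- sorted differences l
def cand (P : Int) : List Int → Int → Int → List Int
  | [], _, _ => []
  | m :: l, last, j => (last + 2 * j * P + m) :: cand P l (last + 2 * j * P + m) (j + 1)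

-- B's loop replayed over the descending sort: the reference fold both sides are reduced to
def bRun (P total : Int) : List Int → Int → Int → Int → Int
  | [], best, _, _ => best
  | m :: l, best, gain, k =>
    bRun P total l (max best (total + (gain + m) + P * (k + 1) * (k + 1 - 1))) (gain + m) (k + 1)

-- extracting the first maximum and removing it is taking head and tail of the descending sort
lemma sorted_rev_cons_max (rs : List Int) (h : rs ≠ []) :
    PySem.List.sorted rs (fun x => x) true
      = (PySem.List.max? rs (fun x => x)).getD 0
        :: PySem.List.sorted ((PySem.List.remove? rs ((PySem.List.max? rs (fun x => x)).getD 0)).getD []) (fun x => x) true := by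
  obtain ⟨m, hm⟩ : ∃ m, PySem.List.max? rs (fun x => x) = some m := by
    cases hmx : PySem.List.max? rs (fun x => x) with
    | none => exact absurd ((PySem.List.max?_eq_none_iff rs _).mp hmx) h
    | some m => exact ⟨m, rfl⟩
  have hmem : m ∈ rs := PySem.List.max?_mem hm
  rw [hm, Option.getD_some, PySem.List.remove?_eq_some_erase rs m hmem, Option.getD_some]
  obtain ⟨hd, t, hst⟩ : ∃ hd t, PySem.List.sorted rs (fun x => x) true = hd :: t := by
    cases hs : PySem.List.sorted rs (fun x => x) true with
    | nil => exact absurd ((PySem.List.sorted_eq_nil_iff rs _ true).mp hs) h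
    | cons a b => exact ⟨a, b, rfl⟩
  have hperm : (PySem.List.sorted rs (fun x => x) true).Perm rs := PySem.List.sorted_perm rs _ true
  have hdmem : hd ∈ rs := hperm.mem_iff.mp (hst ▸ List.mem_cons_self)
  have hhd : hd = m := le_antisymm (PySem.List.max?_isMax hm hd hdmem)
    (PySem.List.key_head_sorted_rev_ge rs (fun x => x) hst m hmem)
  subst hhd
  rw [hst]
  congr 1
  have ht : t.Perm (rs.erase hd) := by
    have h1 : (hd :: t).Perm (hd :: rs.erase hd) := (hst ▸ hperm).trans (List.perm_cons_erase hdmem)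
    exact (List.perm_cons hd).mp h1
  have hp2 : (PySem.List.sorted (rs.erase hd) (fun x => x) true).Perm t :=
    (PySem.List.sorted_perm _ _ true).trans ht.symm
  have hpw1 : List.Pairwise (fun a b : Int => b ≤ a) (PySem.List.sorted (rs.erase hd) (fun x => x) true) :=
    PySem.List.sorted_pairwise_rev _ _
  have hpw2 : List.Pairwise (fun a b : Int => b ≤ a) t := by
    have := PySem.List.sorted_pairwise_rev rs (fun x : Int => x)
    rw [hst] at this
    exact this.of_cons
  refine (PySem.List.eq_of_perm_of_pairwise_le_of_injective (fun x : Int => -x)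
    (fun a b hab => by simpa using hab) hp2 ?_ ?_).symm
  · exact hpw1.imp (fun {a b} hab => by dsimp only; omega)
  · exact hpw2.imp (fun {a b} hab => by dsimp only; omega)

-- the selection loop equals the fold of bRun over the descending sort
lemma selLoop_eq_bRun_aux (P total : Int) (n : Nat) :
    ∀ (rs : List Int) (best gain k : Int), rs.length = n →
    selLoop P total n rs best gain k
      = bRun P total (PySem.List.sorted rs (fun x => x) true) best gain k := by
  induction n with
  | zero =>
    intro rs best gain k hlen
    rw [List.length_eq_zero_iff.mp hlen]
    rfl
  | succ n ih =>
    intro rs best gain k hlen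
    have hne : rs ≠ [] := by intro hnil; subst hnil; simp at hlen
    obtain ⟨m, hm⟩ : ∃ m, PySem.List.max? rs (fun x => x) = some m := by
      cases hmx : PySem.List.max? rs (fun x => x) with
      | none => exact absurd ((PySem.List.max?_eq_none_iff rs _).mp hmx) hne
      | some m => exact ⟨m, rfl⟩
    have hmem : m ∈ rs := PySem.List.max?_mem hm
    have hrem : PySem.List.remove? rs m = some (rs.erase m) :=
      PySem.List.remove?_eq_some_erase rs m hmem
    rw [sorted_rev_cons_max rs hne]
    simp only [selLoop, bRun, hm, hrem, Option.getD_some,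
      List.isEmpty_iff, if_neg hne]
    exact ih _ _ _ _ (by simp [List.length_erase_of_mem hmem, hlen])

-- running max over A's candidate entries is B's fold (closed form P*(k+1)*k folded in)
lemma foldl_cand_eq_bRun (P total : Int) :
    ∀ (l : List Int) (gain best j : Int),
    (cand P l (total + gain + P * j * (j - 1)) j).foldl max best = bRun P total l best gain j := by
  intro l
  induction l with
  | nil => intro gain best j; rfl
  | cons m l ih =>
    intro gain best j
    simp only [cand, List.foldl_cons, bRun]
    have hv : total + gain + P * j * (j - 1) + 2 * j * P + m
        = total + (gain + m) + P * (j + 1) * (j + 1 - 1) := by ring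
    rw [hv]
    exact ih (gain + m) _ (j + 1)

-- A's append loop materialises exactly acc ++ cand …
lemma loopA (P : Int) (sd : List Int) :
    ∀ (l : List Int) (j : Int) (acc : List Int) (h : acc ≠ []),
      0 ≤ j → sd.drop j.toNat = l → j + l.length = sd.length →
      (PySem.List.pyRange j (sd.length : Int) 1).foldl
        (fun ans i => ans ++ [PySem.List.pyGetD ans (-1) 0 + 2 * i * P + PySem.List.pyGetD sd i 0]) acc
      = acc ++ cand P l (acc.getLast h) j := by
  intro l
  induction l with
  | nil =>
    intro j acc h hj hdrop hlen
    rw [PySem.List.pyRange_one_eq_nil (by simp at hlen; omega)]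
    simp [cand]
  | cons m l ih =>
    intro j acc h hj hdrop hlen
    have hjlt : j < (sd.length : Int) := by simp at hlen ⊢; omega
    rw [PySem.List.pyRange_one_cons hjlt]
    simp only [List.foldl_cons]
    have hgetm : PySem.List.pyGetD sd j 0 = m := by
      rw [PySem.List.pyGetD_eq_getElem sd 0 hj hjlt]
      have h9 : sd[j.toNat]? = some m := by rw [← List.head?_drop, hdrop]; rfl
      exact (List.getElem_eq_iff (by omega)).mpr h9
    have hlast : PySem.List.pyGetD acc (-1) 0 = acc.getLast h := PySem.List.pyGetD_neg_one acc 0 h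
    rw [hgetm, hlast]
    set v := acc.getLast h + 2 * j * P + m with hv
    have hacc' : acc ++ [v] ≠ [] := by simp
    have hstep := ih (j + 1) (acc ++ [v]) hacc'
      (by omega)
      (by
        have : (j + 1).toNat = j.toNat + 1 := by omega
        rw [this, ← List.drop_drop, hdrop]
        rfl)
      (by simp at hlen ⊢; omega)
    rw [hstep]
    have hlast' : (acc ++ [v]).getLast hacc' = v := by simp
    rw [hlast']
    simp only [cand, ← hv]
    rw [List.append_assoc]
    rfl

-- the two ports agree on every input (no precondition needed for the ports themselves)
lemma main_eq (N P Q : Int) (ch : List Int) :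
    maximize_happiness N P Q ch = maximize_happiness_alt N P Q ch := by
  unfold maximize_happiness maximize_happiness_alt
  simp only []
  rcases Int.lt_or_le N 0 with hN | hN
  · rw [PySem.List.pyRange_one_eq_nil (by omega)]
    rfl
  · set total := ch.sum with htot
    set difs := (PySem.List.pyRange 0 N 1).map
        (fun i => P * (Q - i) - PySem.List.pyGetD ch i 0) with hdifs
    set sd := PySem.List.sorted difs (fun x => x) true with hsd
    have hlen : (sd.length : Int) = N := by
      rw [hsd, PySem.List.length_sorted, hdifs, List.length_map,
        PySem.List.length_pyRange_one]
      omega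
    rw [show PySem.List.pyRange 0 N 1 = PySem.List.pyRange 0 (sd.length : Int) 1 by rw [hlen]]
    rw [loopA P sd sd 0 [total] (by simp) le_rfl (by simp) (by simp)]
    rw [List.getLast_singleton, List.singleton_append, PySem.List.max?_id_cons,
      Option.getD_some]
    have h0 : total = total + 0 + P * 0 * (0 - 1) := by ring
    rw [show cand P sd total 0 = cand P sd (total + 0 + P * 0 * (0 - 1)) 0 by rw [← h0]]
    rw [foldl_cand_eq_bRun P total sd 0 total 0]
    rw [selLoop_eq_bRun_aux P total difs.length difs total 0 0 rfl]

-- ===== VERDICT (by name: the statement is the Claim_ definition above) =====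
theorem maximize_happiness_spec : Claim_equal_maximize_happiness := by
  intro N P Q ch _ _
  unfold Spec_maximize_happiness
  exact main_eq N P Q ch
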